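-- pv_equiv track=rewrite | github.com/anon-brqr7GMRzNQ8/feddrop | fed/datasets/image.py | bin_index
-- ===== SOURCE A (Python) =====
-- def bin_index(dataset):
--     bins = {}
--     for i, (_, label) in enumerate(dataset):
--         bins.setdefault(int(label), []).append(i)
--     flattened = []
--     for k in sorted(bins):
--         flattened += bins[k]
--     return bins, flattened
-- ===== SOURCE B (Python) =====
-- def bin_index(dataset):
--     labeled = [(int(label), i) for i, (_, label) in enumerate(dataset)]
--     pairs = sorted(labeled, key=lambda p: p[0])   # stable: ties keep appearance order
--     flattened = [i for _, i in pairs]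
--     bins = {k: [i for l, i in labeled if l == k]
--             for k in dict.fromkeys(l for l, _ in labeled)}
--     return bins, flattened
-- ===== Notes on version B (the rewrite author's own statement) =====
-- stated objective: alternative
-- what changed: Replaces A's one-pass setdefault/append dict-bucketing plus per-key flattening with a whole-sequence stable sort of (label, index) pairs whose second components are read off directly as the flattened list, plus a declarative reconstruction of the bins from the labeled pairs.
import Mathlib
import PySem

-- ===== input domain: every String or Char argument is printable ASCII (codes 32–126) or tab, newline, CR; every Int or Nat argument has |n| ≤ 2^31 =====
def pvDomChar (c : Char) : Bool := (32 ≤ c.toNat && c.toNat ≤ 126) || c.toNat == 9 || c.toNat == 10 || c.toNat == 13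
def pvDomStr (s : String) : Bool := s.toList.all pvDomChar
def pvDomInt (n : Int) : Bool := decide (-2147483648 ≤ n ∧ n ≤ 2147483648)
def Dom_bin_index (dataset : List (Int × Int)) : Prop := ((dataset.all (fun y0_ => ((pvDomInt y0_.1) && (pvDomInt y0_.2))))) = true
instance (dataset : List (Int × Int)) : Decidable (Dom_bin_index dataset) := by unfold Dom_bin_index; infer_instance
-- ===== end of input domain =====

-- B replaces A's one-pass setdefault/append dict-bucketing by one stable sort of the
-- (label, index) pairs (its second components are the flattened list) plus a declarative
-- reconstruction of the bins (objective: alternative decomposition, not faster).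

-- ===== PORT A =====
-- 'bins.setdefault(int(label), []).append(i)' sets bins[label] to bins.get(label, []) ++ [i]
-- in place, which is exactly Dict.modify label [] (· ++ [i]); labels are already ints here.
-- 'bins[k]' with k ∈ bins.keys is ported as getD (KeyError impossible).
def bin_index (dataset : List (Int × Int)) : (List (Int × List Int)) × List Int :=
  let bins : PySem.Dict Int (List Int) :=
    (PySem.List.enumerate dataset 0).foldl
      (fun d p => d.modify p.2.2 [] (fun v => v ++ [p.1])) PySem.Dict.empty
  let flattened : List Int :=
    (PySem.List.sorted bins.keys (fun k => k) false).foldl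
      (fun acc k => acc ++ bins.getD k []) []
  (bins.items, flattened)

-- ===== PORT B =====
-- 'dict.fromkeys(…)' used for its keys is PySem.List.dedup; the dict comprehension over the
-- distinct keys is Dict.ofList; sorted(labeled, key=p[0]) is PySem.List.sorted (stable).
def bin_index_alt (dataset : List (Int × Int)) : (List (Int × List Int)) × List Int :=
  let labeled : List (Int × Int) :=
    (PySem.List.enumerate dataset 0).map (fun p => (p.2.2, p.1))
  let pairs : List (Int × Int) := PySem.List.sorted labeled (fun p => p.1) false
  let flattened : List Int := pairs.map (fun p => p.2)
  let bins : PySem.Dict Int (List Int) :=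
    PySem.Dict.ofList ((PySem.List.dedup (labeled.map (fun p => p.1))).map (fun k =>
      (k, (labeled.filter (fun p => p.1 == k)).map (fun p => p.2))))
  (bins.items, flattened)

-- ===== PRECONDITION & SPEC =====
def Spec_bin_index (dataset : List (Int × Int)) (out : (List (Int × List Int)) × List Int) : Prop := out = bin_index_alt dataset
instance (dataset : List (Int × Int)) (out : (List (Int × List Int)) × List Int) : Decidable (Spec_bin_index dataset out) := by unfold Spec_bin_index; infer_instance

-- ===== CLAIM (what is proved, stated in full; the proofs are below) =====
def Claim_equal_bin_index : Prop := ∀ (dataset : List (Int × Int)), Dom_bin_index dataset → Spec_bin_index dataset (bin_index dataset)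

-- ===== LEMMAS AND PROOFS =====

-- The canonical value of a bin: the positions of label k, in order.
def binVal (dataset : List (Int × Int)) (k : Int) : List Int :=
  ((PySem.List.enumerate dataset 0).filter (fun p => p.2.2 == k)).map (fun p => p.1)

-- x is inserted at the very front when it sorts strictly before everything.
lemma insertBy_all_true {α : Type} (before : α → α → Bool) (x : α) (l : List α)
    (h : ∀ y ∈ l, before x y = true) : PySem.List.insertBy before x l = x :: l := by
  cases l with
  | nil => rfl
  | cons y ys => simp [PySem.List.insertBy, h y (by simp)]

-- x passes over a whole block it does not sort before.
lemma insertBy_skip {α : Type} (before : α → α → Bool) (x : α) (ys zs : List α)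
    (h : ∀ y ∈ ys, before x y = false) :
    PySem.List.insertBy before x (ys ++ zs) = ys ++ PySem.List.insertBy before x zs := by
  induction ys with
  | nil => rfl
  | cons y ys ih =>
      simp [List.cons_append, PySem.List.insertBy, h y (by simp),
        ih (fun y hy => h y (by simp [hy]))]

-- Inserting x into a key-grouped list: it lands at the end of its own key's group.
lemma insertBy_flatMap_group (K : List Int) (g : Int → List (Int × Int)) (x : Int × Int)
    (hK : K.Pairwise (· < ·)) (hg : ∀ k ∈ K, ∀ p ∈ g k, p.1 = k) :
    PySem.List.insertBy (fun a b => decide (a.1 < b.1)) x (K.flatMap g)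
      = (K.filter (fun k => decide (k < x.1))).flatMap g
        ++ (if x.1 ∈ K then g x.1 ++ [x] else [x])
        ++ (K.filter (fun k => decide (x.1 < k))).flatMap g := by
  induction K with
  | nil => simp [PySem.List.insertBy]
  | cons k K ih =>
      have hKk : ∀ k' ∈ K, k < k' := fun k' hk' => (List.pairwise_cons.mp hK).1 k' hk'
      have hkey : ∀ p ∈ g k, p.1 = k := hg k (by simp)
      have hkeyK : ∀ k' ∈ K, ∀ p ∈ g k', p.1 = k' := fun k' hk' => hg k' (by simp [hk'])
      have ihK := ih (List.pairwise_cons.mp hK).2 hkeyK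
      rcases lt_trichotomy x.1 k with hlt | heq | hgt
      · -- x sorts before the whole list
        have hall : ∀ y ∈ (k :: K).flatMap g, (fun a b : Int × Int => decide (a.1 < b.1)) x y = true := by
          intro y hy
          rcases List.mem_flatMap.mp hy with ⟨k', hk', hyk'⟩
          have : y.1 = k' := hg k' hk' y hyk'
          have hk'' : k ≤ k' := by
            rcases List.mem_cons.mp hk' with h | h
            · exact le_of_eq h.symm
            · exact le_of_lt (hKk _ h)
          simp only [decide_eq_true_eq]; omega
        rw [insertBy_all_true _ _ _ hall]
        have h1 : (k :: K).filter (fun k' => decide (k' < x.1)) = [] := by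
          rw [List.filter_eq_nil_iff]
          intro k' hk'
          have hk'' : k ≤ k' := by
            rcases List.mem_cons.mp hk' with h | h
            · exact le_of_eq h.symm
            · exact le_of_lt (hKk _ h)
          simp only [decide_eq_true_eq]; omega
        have h2 : (k :: K).filter (fun k' => decide (x.1 < k')) = k :: K := by
          rw [List.filter_eq_self]
          intro k' hk'
          have hk'' : k ≤ k' := by
            rcases List.mem_cons.mp hk' with h | h
            · exact le_of_eq h.symm
            · exact le_of_lt (hKk _ h)
          simp only [decide_eq_true_eq]; omega
        have hmem : x.1 ∉ (k :: K) := by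
          intro hm
          rcases List.mem_cons.mp hm with h | h
          · omega
          · exact absurd (hKk _ h) (by omega)
        rw [h1, h2, if_neg hmem]
        simp
      · -- x joins the head group
        have hskip : ∀ y ∈ g k, (fun a b : Int × Int => decide (a.1 < b.1)) x y = false := by
          intro y hy
          have : y.1 = k := hkey y hy
          simp only [decide_eq_false_iff_not]; omega
        have hall : ∀ y ∈ K.flatMap g, (fun a b : Int × Int => decide (a.1 < b.1)) x y = true := by
          intro y hy
          rcases List.mem_flatMap.mp hy with ⟨k', hk', hyk'⟩
          have : y.1 = k' := hkeyK k' hk' y hyk'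
          have := hKk k' hk'
          simp only [decide_eq_true_eq]; omega
        rw [List.flatMap_cons, insertBy_skip _ _ _ _ hskip, insertBy_all_true _ _ _ hall]
        have h1 : (k :: K).filter (fun k' => decide (k' < x.1)) = [] := by
          rw [List.filter_eq_nil_iff]
          intro k' hk'
          rcases List.mem_cons.mp hk' with h | h
          · subst h; simp only [decide_eq_true_eq]; omega
          · have := hKk _ h; simp only [decide_eq_true_eq]; omega
        have h2 : (k :: K).filter (fun k' => decide (x.1 < k')) = K := by
          simp only [List.filter_cons]
          rw [if_neg (by simp only [decide_eq_true_eq]; omega)]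
          rw [List.filter_eq_self]
          intro k' hk'
          have := hKk _ hk'; simp only [decide_eq_true_eq]; omega
        have hmem : x.1 ∈ (k :: K) := by simp [heq]
        rw [h1, h2, if_pos hmem, heq]
        simp
      · -- x passes the head group
        have hskip : ∀ y ∈ g k, (fun a b : Int × Int => decide (a.1 < b.1)) x y = false := by
          intro y hy
          have : y.1 = k := hkey y hy
          simp only [decide_eq_false_iff_not]; omega
        rw [List.flatMap_cons, insertBy_skip _ _ _ _ hskip, ihK]
        have h1 : (k :: K).filter (fun k' => decide (k' < x.1))
            = k :: K.filter (fun k' => decide (k' < x.1)) := by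
          simp only [List.filter_cons]
          rw [if_pos (by simp only [decide_eq_true_eq]; omega)]
        have h2 : (k :: K).filter (fun k' => decide (x.1 < k'))
            = K.filter (fun k' => decide (x.1 < k')) := by
          simp only [List.filter_cons]
          rw [if_neg (by simp only [decide_eq_true_eq]; omega)]
        rw [h1, h2]
        have hiff : x.1 ∈ (k :: K) ↔ x.1 ∈ K := by
          simp only [List.mem_cons]
          refine ⟨fun h => ?_, Or.inr⟩
          rcases h with h | h
          · omega
          · exact h
        simp only [hiff]
        simp

-- A strictly increasing list splits around any member.
lemma split_pairwise_lt (K : List Int) (a : Int) (hK : K.Pairwise (· < ·)) (ha : a ∈ K) :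
    K = K.filter (fun k => decide (k < a)) ++ a :: K.filter (fun k => decide (a < k)) := by
  induction K with
  | nil => cases ha
  | cons b K ih =>
      rcases List.mem_cons.mp ha with h | h
      · subst h
        have hgt : ∀ k ∈ K, a < k := fun k hk => (List.pairwise_cons.mp hK).1 k hk
        have h1 : K.filter (fun k => decide (k < a)) = [] := by
          rw [List.filter_eq_nil_iff]
          intro k hk; simpa using not_lt_of_gt (hgt k hk)
        have h2 : K.filter (fun k => decide (a < k)) = K := by
          rw [List.filter_eq_self]
          intro k hk; simpa using hgt k hk
        simp [h1, h2]
      · have hba : b < a := (List.pairwise_cons.mp hK).1 a h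
        have := ih (List.pairwise_cons.mp hK).2 h
        simp only [List.filter_cons, decide_eq_true_eq]
        rw [if_pos (by simpa using hba), if_neg (by simpa using not_lt_of_gt hba)]
        simpa using this

-- set(xs ++ [a]) extends set(xs) on the right.
lemma ofList_append_singleton (xs : List Int) (a : Int) :
    PySem.Set.ofList (xs ++ [a]) = PySem.Set.add (PySem.Set.ofList xs) a := by
  simp [PySem.Set.ofList_eq_foldl, List.foldl_append, PySem.Set.add]

-- sorted(set(xs ++ [a])) for a fresh key a: a lands between the smaller and larger keys.
lemma sortedKeys_append_fresh (xs : List Int) (a : Int) (ha : a ∉ xs) :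
    PySem.List.sorted (PySem.Set.ofList (xs ++ [a])) (fun k => k) false
      = (PySem.List.sorted (PySem.Set.ofList xs) (fun k => k) false).filter (fun k => decide (k < a))
        ++ a :: (PySem.List.sorted (PySem.Set.ofList xs) (fun k => k) false).filter (fun k => decide (a < k)) := by
  have hmemS : a ∉ PySem.Set.ofList xs := fun h => ha ((PySem.Set.mem_ofList xs a).mp h)
  have hofl : PySem.Set.ofList (xs ++ [a]) = PySem.Set.ofList xs ++ [a] := by
    rw [ofList_append_singleton, PySem.Set.add]
    rw [if_neg (by
      intro h
      exact hmemS (by simpa [PySem.Set.contains] using h))]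
  set K := PySem.List.sorted (PySem.Set.ofList xs) (fun k => k) false with hKdef
  have hKpw : K.Pairwise (· < ·) := PySem.List.sorted_ofList_pairwise_lt xs
  have hmemK : a ∉ K := fun h => hmemS ((PySem.List.mem_sorted _ _ _ _).mp h)
  rw [hofl]
  apply PySem.List.sorted_eq_of_perm_of_pairwise_lt
  · -- permutation
    have hf2 : K.filter (fun k => decide (a < k)) = K.filter (fun k => !(decide (k < a))) := by
      apply List.filter_congr
      intro k hk
      have hne : k ≠ a := fun h => hmemK (h ▸ hk)
      by_cases h : k < a
      · have h2 : ¬ a < k := by omega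
        simp [h, h2]
      · have h2 : a < k := by omega
        simp [h, h2]
    refine List.perm_middle.trans (List.Perm.trans ?_ (List.perm_append_singleton a _).symm)
    refine List.Perm.cons a ?_
    rw [hf2]
    exact (List.filter_append_perm _ K).trans (PySem.List.sorted_perm _ _ _)
  · -- strictly increasing
    rw [List.pairwise_append]
    refine ⟨hKpw.sublist List.filter_sublist, ?_, ?_⟩
    · rw [List.pairwise_cons]
      refine ⟨fun k hk => ?_, hKpw.sublist List.filter_sublist⟩
      have := List.of_mem_filter hk; simpa using this
    · intro k hk y hy
      have h1 : k < a := by have := List.of_mem_filter hk; simpa using this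
      rcases List.mem_cons.mp hy with h | h
      · omega
      · have h2 : a < y := by have := List.of_mem_filter h; simpa using this
        omega

-- THE KEY FACT: a stable sort by first component is the concatenation, over the distinct
-- keys in increasing order, of the key's pairs in their original order.
lemma sorted_fst_eq_flatMap (l : List (Int × Int)) :
    PySem.List.sorted l (fun p => p.1) false
      = (PySem.List.sorted (PySem.Set.ofList (l.map (fun p => p.1))) (fun k => k) false).flatMap
          (fun k => l.filter (fun p => p.1 == k)) := by
  induction l using List.reverseRecOn with
  | nil => rfl
  | append_singleton l x ih =>
      have hfold : PySem.List.sorted (l ++ [x]) (fun p => p.1) false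
          = PySem.List.insertBy (fun a b => decide (a.1 < b.1)) x
              (PySem.List.sorted l (fun p => p.1) false) := by
        rw [PySem.List.sorted_eq_foldl_insertBy, PySem.List.sorted_eq_foldl_insertBy,
          List.foldl_append]
        rfl
      rw [hfold, ih]
      set K := PySem.List.sorted (PySem.Set.ofList (l.map (fun p => p.1))) (fun k => k) false
        with hK
      have hKpw : K.Pairwise (· < ·) :=
        PySem.List.sorted_ofList_pairwise_lt (l.map (fun p => p.1))
      have hg : ∀ k ∈ K, ∀ p ∈ l.filter (fun p => p.1 == k), p.1 = k := by
        intro k _ p hp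
        have := List.of_mem_filter hp
        simpa using this
      rw [insertBy_flatMap_group K _ x hKpw hg]
      have hmapfst : (l ++ [x]).map (fun p : Int × Int => p.1)
          = l.map (fun p => p.1) ++ [x.1] := by simp
      have hgk : ∀ k : Int, (l ++ [x]).filter (fun p => p.1 == k)
          = l.filter (fun p => p.1 == k) ++ if x.1 = k then [x] else [] := by
        intro k
        rw [List.filter_append]
        congr 1
        by_cases h : x.1 = k
        · simp [h]
        · simp [h]
      have hmemiff : x.1 ∈ K ↔ x.1 ∈ l.map (fun p => p.1) := by
        rw [hK, PySem.List.mem_sorted, PySem.Set.mem_ofList]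
      have hcong1 : (K.filter (fun k => decide (k < x.1))).flatMap
            (fun k => (l ++ [x]).filter (fun p => p.1 == k))
          = (K.filter (fun k => decide (k < x.1))).flatMap
            (fun k => l.filter (fun p => p.1 == k)) := by
        apply List.flatMap_congr
        intro k hk
        have hklt : k < x.1 := by have := List.of_mem_filter hk; simpa using this
        rw [hgk k, if_neg (by omega), List.append_nil]
      have hcong2 : (K.filter (fun k => decide (x.1 < k))).flatMap
            (fun k => (l ++ [x]).filter (fun p => p.1 == k))
          = (K.filter (fun k => decide (x.1 < k))).flatMap
            (fun k => l.filter (fun p => p.1 == k)) := by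
        apply List.flatMap_congr
        intro k hk
        have hkgt : x.1 < k := by have := List.of_mem_filter hk; simpa using this
        rw [hgk k, if_neg (by omega), List.append_nil]
      by_cases hx : x.1 ∈ l.map (fun p => p.1)
      · -- the key already occurs: the sorted key list is unchanged
        have hK' : PySem.List.sorted (PySem.Set.ofList ((l ++ [x]).map (fun p => p.1)))
            (fun k => k) false = K := by
          rw [hmapfst, ofList_append_singleton, PySem.Set.add,
            if_pos (by
              have : x.1 ∈ PySem.Set.ofList (l.map (fun p => p.1)) :=
                (PySem.Set.mem_ofList _ _).mpr hx
              simpa [PySem.Set.contains] using this)]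
        have hxK : x.1 ∈ K := hmemiff.mpr hx
        rw [hK', if_pos hxK]
        conv_rhs => rw [split_pairwise_lt K x.1 hKpw hxK]
        rw [List.flatMap_append, List.flatMap_cons, hcong1, hcong2,
          hgk x.1, if_pos rfl]
        simp [List.append_assoc]
      · -- a fresh key: it is spliced into the sorted key list
        have hxnotK : x.1 ∉ K := fun h => hx (hmemiff.mp h)
        have hK' : PySem.List.sorted (PySem.Set.ofList ((l ++ [x]).map (fun p => p.1)))
            (fun k => k) false
            = K.filter (fun k => decide (k < x.1)) ++ x.1 :: K.filter (fun k => decide (x.1 < k)) := by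
          rw [hmapfst]
          exact sortedKeys_append_fresh _ _ hx
        have hgempty : l.filter (fun p => p.1 == x.1) = [] := by
          rw [List.filter_eq_nil_iff]
          intro p hp hbeq
          exact hx (List.mem_map.mpr ⟨p, hp, by simpa using hbeq⟩)
        rw [hK', if_neg hxnotK]
        rw [List.flatMap_append, List.flatMap_cons, hcong1, hcong2,
          hgk x.1, if_pos rfl, hgempty]
        simp [List.append_assoc]

-- the labels of the swapped enumeration are the labels of the dataset
lemma labeled_map_fst (dataset : List (Int × Int)) :
    ((PySem.List.enumerate dataset 0).map (fun p => (p.2.2, p.1))).map (fun p => p.1)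
      = dataset.map (fun p => p.2) := by
  rw [List.map_map]
  rw [show ((fun p : Int × Int => p.1) ∘ (fun p : Int × (Int × Int) => (p.2.2, p.1)))
      = ((fun q : Int × Int => q.2) ∘ (fun p : Int × (Int × Int) => p.2)) from rfl,
    ← List.map_map, PySem.List.map_snd_enumerate]

-- a bin read off the swapped enumeration is binVal
lemma labeled_filter_map (dataset : List (Int × Int)) (k : Int) :
    (((PySem.List.enumerate dataset 0).map (fun p => (p.2.2, p.1))).filter
        (fun p => p.1 == k)).map (fun p => p.2) = binVal dataset k := by
  rw [List.filter_map, List.map_map]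
  rfl

-- A's dict after the loop: value at k.
lemma binsA_getD (dataset : List (Int × Int)) (k : Int) :
    ((PySem.List.enumerate dataset 0).foldl
      (fun d p => d.modify p.2.2 [] (fun v => v ++ [p.1])) PySem.Dict.empty).getD k []
      = binVal dataset k := by
  have h := PySem.Dict.getD_foldl_modify_append
    ((PySem.List.enumerate dataset 0).map (fun q : Int × (Int × Int) => (q.2.2, q.1)))
    (PySem.Dict.empty : PySem.Dict Int (List Int)) k
  rw [List.foldl_map] at h
  simp only [] at h
  rw [h]
  simp [binVal, List.filter_map, List.map_map, Function.comp_def, PySem.Dict.empty,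
    PySem.Dict.getD, PySem.Dict.get?]

-- A's dict after the loop: keys = distinct labels in first-appearance order.
lemma binsA_keys (dataset : List (Int × Int)) :
    ((PySem.List.enumerate dataset 0).foldl
      (fun d p => d.modify p.2.2 [] (fun v => v ++ [p.1])) PySem.Dict.empty).keys
      = PySem.List.dedup (dataset.map (fun p => p.2)) := by
  rw [PySem.Dict.keys_foldl_modify_key (PySem.List.enumerate dataset 0)
      (fun p => p.2.2) [] (fun _ p => fun v => v ++ [p.1]) PySem.Dict.empty]
  have h : (PySem.List.enumerate dataset 0).map (fun p => p.2.2)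
      = dataset.map (fun p => p.2) := by
    rw [show (fun p : Int × (Int × Int) => p.2.2)
        = ((fun q : Int × Int => q.2) ∘ (fun p : Int × (Int × Int) => p.2)) from rfl,
      ← List.map_map, PySem.List.map_snd_enumerate]
  simp [PySem.Dict.keys, PySem.Dict.empty, h, PySem.Set.update_nil_left]

lemma binsA_keys_nodup (dataset : List (Int × Int)) :
    ((PySem.List.enumerate dataset 0).foldl
      (fun d p => d.modify p.2.2 [] (fun v => v ++ [p.1])) PySem.Dict.empty).keys.Nodup := by
  rw [binsA_keys]; exact PySem.Set.nodup_ofList (dataset.map (fun p => p.2))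

-- B's dict: its items are literally the comprehension list.
lemma binsB_items (dataset : List (Int × Int)) :
    (PySem.Dict.ofList ((PySem.List.dedup
        (((PySem.List.enumerate dataset 0).map (fun p => (p.2.2, p.1))).map (fun p => p.1))).map (fun k =>
      (k, (((PySem.List.enumerate dataset 0).map (fun p => (p.2.2, p.1))).filter
            (fun p => p.1 == k)).map (fun p => p.2))))).items
    = (PySem.List.dedup (dataset.map (fun p => p.2))).map (fun k => (k, binVal dataset k)) := by
  rw [labeled_map_fst]
  have hval : ∀ k : Int, (k, (((PySem.List.enumerate dataset 0).map (fun p => (p.2.2, p.1))).filter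
      (fun p => p.1 == k)).map (fun p => p.2)) = (k, binVal dataset k) :=
    fun k => by rw [labeled_filter_map]
  simp only [hval]
  have hfresh : ∀ a ∈ (PySem.List.dedup (dataset.map (fun p => p.2))).map
      (fun k => (k, binVal dataset k)),
      (PySem.Dict.empty : PySem.Dict Int (List Int)).contains a.1 = false := by
    intro a _; simp [PySem.Dict.contains_empty]
  have hnd : (((PySem.List.dedup (dataset.map (fun p => p.2))).map
      (fun k => (k, binVal dataset k))).map (fun a => a.1)).Nodup := by
    simp only [List.map_map, Function.comp_def]
    simpa using PySem.Set.nodup_ofList (dataset.map (fun p => p.2))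
  rw [show (PySem.Dict.ofList ((PySem.List.dedup (dataset.map (fun p => p.2))).map
      (fun k => (k, binVal dataset k))))
    = ((PySem.List.dedup (dataset.map (fun p => p.2))).map
      (fun k => (k, binVal dataset k))).foldl (fun d a => d.insert a.1 a.2) PySem.Dict.empty from rfl,
    PySem.Dict.items_foldl_insert_fresh _ _ _ _ hfresh hnd]
  simp [PySem.Dict.empty]

-- ===== VERDICT (by name: the statement is the Claim_ definition above) =====
theorem bin_index_spec : Claim_equal_bin_index := by
  intro dataset _
  show bin_index dataset = bin_index_alt dataset
  unfold bin_index bin_index_alt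
  simp only []
  refine Prod.ext ?_ ?_
  · -- items
    rw [PySem.Dict.items_eq_map_keys _ (binsA_keys_nodup dataset) [], binsA_keys, binsB_items]
    exact List.map_congr_left (fun k _ => by rw [binsA_getD])
  · -- flattened
    rw [PySem.List.foldl_append_eq_flatMap, List.nil_append, binsA_keys,
      sorted_fst_eq_flatMap, List.map_flatMap, labeled_map_fst]
    refine List.flatMap_congr ?_
    intro k _
    rw [binsA_getD, labeled_filter_map]
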